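-- pv_equiv track=rewrite | github.com/jclements3/trefoil | scripts/build_tchaikovsky_hymnal.py | compute_bar_duration
-- ===== SOURCE A (Python) =====
-- def _parse_dur(s, i):
--     """Parse an ABC duration starting at position i. Returns (dur_string, new_i)."""
--     start = i
--     # Numerator digits
--     while i < len(s) and s[i].isdigit(): i += 1
--     # Slash and denominator
--     if i < len(s) and s[i] == '/':
--         i += 1
--         while i < len(s) and s[i].isdigit(): i += 1
--     return s[start:i], i
--
-- def compute_bar_duration(mel_abc, full_bar):
--     """Compute actual duration of a melody bar in 64ths.
--     Returns the melody's duration, which may be less than full_bar for pickups.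
--     """
--     total = 0
--     i = 0
--     s = mel_abc.strip()
--     while i < len(s):
--         c = s[i]
--         if c in ' \t': i += 1; continue
--         if c in '()~.^_=': i += 1; continue
--         if c == 'z' or c == 'x':
--             i += 1
--             dur, i = _parse_dur(s, i)
--             total += _dur_to_64ths(dur)
--             continue
--         if c.upper() in 'ABCDEFG':
--             i += 1
--             while i < len(s) and s[i] in "',": i += 1
--             dur, i = _parse_dur(s, i)
--             total += _dur_to_64ths(dur)
--             continue
--         i += 1
--     return total if total > 0 else full_bar
--
-- def _dur_to_64ths(dur_str):
--     """Convert ABC duration string (already in L:1/64 units) to count."""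
--     if not dur_str:
--         return 1
--     if '/' in dur_str:
--         parts = dur_str.split('/')
--         num = int(parts[0]) if parts[0] else 1
--         den = int(parts[1]) if parts[1] else 2
--         return num // den if den > 0 else 1
--     return int(dur_str)
-- ===== SOURCE B (Python) =====
-- def compute_bar_duration(mel_abc, full_bar):
--     """Compute actual duration of a melody bar in 64ths.
--
--     One-pass state machine: durations are accumulated numerically while
--     scanning, so no duration substrings are built or re-parsed.
--     State (mode, num, num_p, den, den_p): mode 0 = octave marks allowed
--     (just after a note letter), 1 = reading numerator, 2 = after '/'.
--     """
--     def finalize(p):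
--         mode, num, num_p, den, den_p = p
--         if mode == 2:
--             n = num if num_p else 1
--             d = den if den_p else 2
--             return n // d if d > 0 else 1
--         return num if num_p else 1
--
--     total = 0
--     pending = None
--     for c in mel_abc.strip():
--         if pending is not None:
--             mode, num, num_p, den, den_p = pending
--             if mode == 0 and c in "',":
--                 continue
--             if mode != 2 and c.isdigit():
--                 pending = (1, num * 10 + int(c), True, 0, False)
--                 continue
--             if mode != 2 and c == '/':
--                 pending = (2, num, num_p, 0, False)
--                 continue
--             if mode == 2 and c.isdigit():
--                 pending = (2, num, num_p, den * 10 + int(c), True)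
--                 continue
--             total += finalize(pending)
--             pending = None
--         # fresh character
--         if c == 'z' or c == 'x':
--             pending = (1, 0, False, 0, False)
--         elif c.upper() in 'ABCDEFG':
--             pending = (0, 0, False, 0, False)
--     if pending is not None:
--         total += finalize(pending)
--     return total if total > 0 else full_bar
-- ===== Notes on version B (the rewrite author's own statement) =====
-- stated objective: alternative
-- what changed: A scans by index, cuts out each duration substring and re-parses it with split('/') and int(); B makes one fold over the characters with a numeric state machine (octave/numerator/denominator modes) that accumulates each duration arithmetically, never building or re-parsing substrings.
import Mathlib
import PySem

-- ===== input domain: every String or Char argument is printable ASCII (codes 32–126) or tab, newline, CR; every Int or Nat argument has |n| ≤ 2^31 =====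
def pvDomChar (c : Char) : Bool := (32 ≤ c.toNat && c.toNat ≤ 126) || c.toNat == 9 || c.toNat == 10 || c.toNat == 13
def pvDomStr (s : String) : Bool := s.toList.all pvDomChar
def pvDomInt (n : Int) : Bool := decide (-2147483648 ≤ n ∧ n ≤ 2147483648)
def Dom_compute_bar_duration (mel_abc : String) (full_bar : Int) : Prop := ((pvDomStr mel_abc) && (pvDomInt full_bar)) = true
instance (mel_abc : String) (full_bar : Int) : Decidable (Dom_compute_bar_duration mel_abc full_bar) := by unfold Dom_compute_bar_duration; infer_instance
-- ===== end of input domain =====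

-- B replaces A's index scan (which cuts out duration substrings and re-parses them with
-- split('/') and int()) by a single fold with a numeric state machine that never builds
-- substrings: alternative decomposition, same return value, no side effects.

-- ===== PORT A =====

-- _parse_dur's 'while i < len(s) and s[i].isdigit(): i += 1', as consume-from-suffix
def pvTakeDigits : List Char → List Char × List Char
  | [] => ([], [])
  | c :: cs =>
    if PySem.Chars.isdigit c then
      let p := pvTakeDigits cs
      (c :: p.1, p.2)
    else ([], c :: cs)

-- _parse_dur: the returned slice s[start:i] is the consumed chars, new_i is the rest;
-- 'if i < len(s) and s[i] == "/"' is the head test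
def pvParseDur (s : List Char) : List Char × List Char :=
  let p := pvTakeDigits s
  if p.2.headD ' ' = '/' then
    let q := pvTakeDigits p.2.tail
    (p.1 ++ '/' :: q.1, q.2)
  else (p.1, p.2)

-- int(t) for the nonempty all-digit strings _dur_to_64ths feeds it (exact there)
def pvIntOfDigits (ds : List Char) : Int :=
  ds.foldl (fun a c => a * 10 + ((c.toNat : Int) - 48)) 0

-- _dur_to_64ths; dur holds at most one '/', so split('/') = (part before, part after)
def pvDurTo64 (dur : List Char) : Int :=
  if dur = [] then 1
  else if dur.contains '/' then
    let p0 := dur.takeWhile (fun d => !(d == '/'))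
    let p1 := (dur.dropWhile (fun d => !(d == '/'))).tail
    let num := if p0 = [] then 1 else pvIntOfDigits p0
    let den := if p1 = [] then 2 else pvIntOfDigits p1
    if den > 0 then PySem.Int.floordiv num den else 1
  else pvIntOfDigits dur

theorem pvTakeDigits_len (s : List Char) : (pvTakeDigits s).2.length ≤ s.length := by
  induction s with
  | nil => simp [pvTakeDigits]
  | cons c cs ih =>
    simp only [pvTakeDigits]
    split
    · exact Nat.le_succ_of_le ih
    · simp

theorem pvParseDur_len (s : List Char) : (pvParseDur s).2.length ≤ s.length := by
  have h1 := pvTakeDigits_len s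
  have h2 := pvTakeDigits_len (pvTakeDigits s).2.tail
  have h3 : (pvTakeDigits s).2.tail.length ≤ (pvTakeDigits s).2.length := by
    cases (pvTakeDigits s).2 <;> simp
  by_cases hh : (pvTakeDigits s).2.headD ' ' = '/'
  · simp only [pvParseDur, hh, if_true]
    exact le_trans h2 (le_trans h3 h1)
  · simp only [pvParseDur, hh, if_false]
    exact h1

-- the main while loop of compute_bar_duration; index advance = suffix consumption
def pvLoopA : List Char → Int → Int
  | [], total => total
  | c :: rest, total =>
    if c = ' ' ∨ c = '\t' then pvLoopA rest total
    else if c = '(' ∨ c = ')' ∨ c = '~' ∨ c = '.' ∨ c = '^' ∨ c = '_' ∨ c = '=' then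
      pvLoopA rest total
    else if c = 'z' ∨ c = 'x' then
      let p := pvParseDur rest
      pvLoopA p.2 (total + pvDurTo64 p.1)
    else if ['A','B','C','D','E','F','G'].contains (PySem.Chars.upperChar c) then
      let r0 := rest.dropWhile (fun d => d == '\'' || d == ',')
      let p := pvParseDur r0
      pvLoopA p.2 (total + pvDurTo64 p.1)
    else pvLoopA rest total
termination_by s _ => s.length
decreasing_by
  · simp
  · simp
  · exact Nat.lt_succ_of_le (pvParseDur_len rest)
  · exact Nat.lt_succ_of_le (le_trans (pvParseDur_len _) (List.length_dropWhile_le _ _))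
  · simp

def compute_bar_duration (mel_abc : String) (full_bar : Int) : Int :=
  let s := PySem.Chars.strip mel_abc.toList
  let total := pvLoopA s 0
  if total > 0 then total else full_bar

-- ===== PORT B =====

-- pending token state (mode, num, num_p, den, den_p);
-- mode 0 = octave marks allowed, 1 = reading numerator, 2 = after '/'
def pvFinalize (p : Nat × Int × Bool × Int × Bool) : Int :=
  if p.1 = 2 then
    let n := if p.2.2.1 then p.2.1 else 1
    let d := if p.2.2.2.2 then p.2.2.2.1 else 2
    if d > 0 then PySem.Int.floordiv n d else 1
  else if p.2.2.1 then p.2.1 else 1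

def pvFresh (c : Char) : Option (Nat × Int × Bool × Int × Bool) :=
  if c = 'z' ∨ c = 'x' then some (1, 0, false, 0, false)
  else if ['A','B','C','D','E','F','G'].contains (PySem.Chars.upperChar c) then
    some (0, 0, false, 0, false)
  else none

def pvStep (st : Int × Option (Nat × Int × Bool × Int × Bool)) (c : Char) :
    Int × Option (Nat × Int × Bool × Int × Bool) :=
  match st with
  | (total, none) => (total, pvFresh c)
  | (total, some (mode, num, num_p, den, den_p)) =>
    if mode = 0 ∧ (c = '\'' ∨ c = ',') then (total, some (mode, num, num_p, den, den_p))
    else if mode ≠ 2 ∧ PySem.Chars.isdigit c then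
      (total, some (1, num * 10 + ((c.toNat : Int) - 48), true, 0, false))
    else if mode ≠ 2 ∧ c = '/' then (total, some (2, num, num_p, 0, false))
    else if mode = 2 ∧ PySem.Chars.isdigit c then
      (total, some (2, num, num_p, den * 10 + ((c.toNat : Int) - 48), true))
    else (total + pvFinalize (mode, num, num_p, den, den_p), pvFresh c)

-- run the fold and add the trailing finalize
def pvRun (s : List Char) (st : Int × Option (Nat × Int × Bool × Int × Bool)) : Int :=
  let st' := s.foldl pvStep st
  match st'.2 with
  | some p => st'.1 + pvFinalize p
  | none => st'.1

def compute_bar_duration_alt (mel_abc : String) (full_bar : Int) : Int :=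
  let total := pvRun (PySem.Chars.strip mel_abc.toList) (0, none)
  if total > 0 then total else full_bar

-- ===== PRECONDITION & SPEC =====
def Spec_compute_bar_duration (mel_abc : String) (full_bar : Int) (out : Int) : Prop := out = compute_bar_duration_alt mel_abc full_bar
instance (mel_abc : String) (full_bar : Int) (out : Int) : Decidable (Spec_compute_bar_duration mel_abc full_bar out) := by unfold Spec_compute_bar_duration; infer_instance

-- ===== CLAIM (what is proved, stated in full; the proofs are below) =====
def Claim_equal_compute_bar_duration : Prop := ∀ (mel_abc : String) (full_bar : Int), Dom_compute_bar_duration mel_abc full_bar → Spec_compute_bar_duration mel_abc full_bar (compute_bar_duration mel_abc full_bar)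

-- ===== LEMMAS AND PROOFS =====

def pvAccDigits (a : Int) (ds : List Char) : Int :=
  ds.foldl (fun a c => a * 10 + ((c.toNat : Int) - 48)) a

theorem pvRun_cons (c : Char) (s : List Char) (st : Int × Option (Nat × Int × Bool × Int × Bool)) :
    pvRun (c :: s) st = pvRun s (pvStep st c) := by
  simp [pvRun]

theorem pvRun_none_cons (c : Char) (s : List Char) (t : Int) :
    pvRun (c :: s) (t, none) = pvRun s (t, pvFresh c) := by
  rw [pvRun_cons]; rfl

-- semantics of a mode-2 (denominator) pending state
def pvDenSem (s : List Char) (t num : Int) (np : Bool) (den : Int) (dp : Bool) : Int :=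
  let q := pvTakeDigits s
  pvRun q.2 (t + pvFinalize (2, num, np, pvAccDigits den q.1, dp || !q.1.isEmpty), none)

-- semantics of a mode-1 (numerator) pending state
def pvNumSem (s : List Char) (t num : Int) (np : Bool) : Int :=
  let q := pvTakeDigits s
  let num' := pvAccDigits num q.1
  let np' := np || !q.1.isEmpty
  if q.2.headD ' ' = '/' then pvDenSem q.2.tail t num' np' 0 false
  else pvRun q.2 (t + (if np' then num' else 1), none)

theorem pvDen_sem (s : List Char) : ∀ (t num : Int) (np : Bool) (den : Int) (dp : Bool),
    pvRun s (t, some (2, num, np, den, dp)) = pvDenSem s t num np den dp := by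
  induction s with
  | nil => intro t num np den dp; simp [pvDenSem, pvTakeDigits, pvRun, pvAccDigits]
  | cons c cs ih =>
    intro t num np den dp
    rw [pvRun_cons]
    by_cases hd : PySem.Chars.isdigit c = true
    · have hstep : pvStep (t, some (2, num, np, den, dp)) c
          = (t, some (2, num, np, den * 10 + ((c.toNat : Int) - 48), true)) := by
        simp [pvStep, hd]
      rw [hstep, ih]
      simp [pvDenSem, pvTakeDigits, hd, pvAccDigits]
    · have hstep : pvStep (t, some (2, num, np, den, dp)) c
          = (t + pvFinalize (2, num, np, den, dp), pvFresh c) := by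
        simp [pvStep, hd]
      rw [hstep]
      simp only [pvDenSem, pvTakeDigits, hd, Bool.false_eq_true, if_false]
      rw [pvRun_none_cons]
      simp [pvAccDigits]

theorem pvNum_sem (s : List Char) : ∀ (t num : Int) (np : Bool),
    pvRun s (t, some (1, num, np, 0, false)) = pvNumSem s t num np := by
  induction s with
  | nil =>
    intro t num np
    simp [pvNumSem, pvTakeDigits, pvRun, pvFinalize, pvAccDigits]
  | cons c cs ih =>
    intro t num np
    rw [pvRun_cons]
    by_cases hd : PySem.Chars.isdigit c = true
    · have hstep : pvStep (t, some (1, num, np, 0, false)) c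
          = (t, some (1, num * 10 + ((c.toNat : Int) - 48), true, 0, false)) := by
        simp [pvStep, hd]
      rw [hstep, ih]
      simp [pvNumSem, pvTakeDigits, hd, pvAccDigits]
    · by_cases hs : c = '/'
      · subst hs
        have hstep : pvStep (t, some (1, num, np, 0, false)) '/'
            = (t, some (2, num, np, 0, false)) := by
          simp [pvStep, hd]
        rw [hstep, pvDen_sem]
        simp [pvNumSem, pvDenSem, pvTakeDigits, hd, pvAccDigits]
      · have hstep : pvStep (t, some (1, num, np, 0, false)) c
            = (t + pvFinalize (1, num, np, 0, false), pvFresh c) := by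
          simp [pvStep, hd, hs]
        have hq : pvTakeDigits (c :: cs) = ([], c :: cs) := by simp [pvTakeDigits, hd]
        rw [hstep]
        simp only [pvNumSem, hq, List.headD_cons, hs, if_false]
        rw [pvRun_none_cons]
        simp [pvFinalize, pvAccDigits]

-- octave state behaves like a fresh numerator state on the string after the octave marks
theorem pvOct_sem (s : List Char) : ∀ (t : Int),
    pvRun s (t, some (0, 0, false, 0, false))
      = pvRun (s.dropWhile (fun d => d == '\'' || d == ',')) (t, some (1, 0, false, 0, false)) := by
  induction s with
  | nil => intro t; simp [pvRun, pvFinalize]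
  | cons c cs ih =>
    intro t
    by_cases hoct : c = '\'' ∨ c = ','
    · have hp : (c == '\'' || c == ',') = true := by
        rcases hoct with h | h <;> subst h <;> rfl
      rw [List.dropWhile_cons, if_pos hp, pvRun_cons]
      have hstep : pvStep (t, some (0, 0, false, 0, false)) c
          = (t, some (0, 0, false, 0, false)) := by
        simp [pvStep, hoct]
      rw [hstep]; exact ih t
    · have hp : (c == '\'' || c == ',') = false := by
        simp only [Bool.or_eq_false_iff, beq_eq_false_iff_ne]
        exact ⟨fun h => hoct (Or.inl h), fun h => hoct (Or.inr h)⟩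
      rw [List.dropWhile_cons, if_neg (by simp [hp]), pvRun_cons, pvRun_cons]
      congr 1
      simp only [pvStep, hoct, and_false, false_and, if_false]
      by_cases hd : PySem.Chars.isdigit c = true
      · simp [hd]
      · by_cases hs : c = '/'
        · simp [hs]
        · simp [hd, hs, pvFinalize]

theorem pvTakeDigits_all (s : List Char) : (pvTakeDigits s).1.all PySem.Chars.isdigit = true := by
  induction s with
  | nil => simp [pvTakeDigits]
  | cons c cs ih =>
    simp only [pvTakeDigits]
    split
    · next h => simpa [h] using ih
    · simp

theorem pvDigits_no_slash {ds : List Char} (h : ds.all PySem.Chars.isdigit = true) :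
    ds.contains '/' = false := by
  simp only [List.all_eq_true] at h
  by_contra hc
  simp only [Bool.not_eq_false, List.contains_eq_mem, decide_eq_true_eq] at hc
  have := h _ hc
  exact absurd this (by decide)

theorem pvDur_digits {ds : List Char} (h : ds.all PySem.Chars.isdigit = true) :
    pvDurTo64 ds = if ds.isEmpty then 1 else pvAccDigits 0 ds := by
  cases ds with
  | nil => simp [pvDurTo64]
  | cons c cs =>
    have hns : (c :: cs).contains '/' = false := pvDigits_no_slash h
    have hne : (c :: cs : List Char) ≠ [] := by simp
    simp only [pvDurTo64, hne, if_false, hns, Bool.false_eq_true, List.isEmpty_cons,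
      pvIntOfDigits, pvAccDigits]

theorem pvTakeWhile_digits {ds : List Char} (tl : List Char)
    (h : ds.all PySem.Chars.isdigit = true) :
    (ds ++ '/' :: tl).takeWhile (fun d => !(d == '/')) = ds ∧
    (ds ++ '/' :: tl).dropWhile (fun d => !(d == '/')) = '/' :: tl := by
  induction ds with
  | nil => simp
  | cons c cs ih =>
    simp only [List.all_cons, Bool.and_eq_true] at h
    have hcne : (fun d => !(d == '/')) c = true := by
      simp only [Bool.not_eq_true', beq_eq_false_iff_ne]
      intro hc; subst hc; exact absurd h.1 (by decide)
    obtain ⟨h1, h2⟩ := ih h.2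
    constructor
    · simpa [List.takeWhile_cons, hcne] using h1
    · simpa [List.dropWhile_cons, hcne] using h2

theorem pvDur_slash {ds es : List Char} (hds : ds.all PySem.Chars.isdigit = true)
    (hes : es.all PySem.Chars.isdigit = true) :
    pvDurTo64 (ds ++ '/' :: es)
      = pvFinalize (2, pvAccDigits 0 ds, !ds.isEmpty, pvAccDigits 0 es, !es.isEmpty) := by
  obtain ⟨h1, h2⟩ := pvTakeWhile_digits es hds
  have hne : ds ++ '/' :: es ≠ [] := by simp
  have hcont : (ds ++ '/' :: es).contains '/' = true := by
    simp [List.contains_eq_mem]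
  simp only [pvDurTo64, hne, if_false, hcont, if_true, h1, h2, List.tail_cons, pvFinalize]
  cases ds <;> cases es <;> simp [pvIntOfDigits, pvAccDigits]

-- fresh numerator state = A's _parse_dur + _dur_to_64ths
theorem pvNumSem_eq_parse (s : List Char) (t : Int) :
    pvNumSem s t 0 false
      = pvRun (pvParseDur s).2 (t + pvDurTo64 (pvParseDur s).1, none) := by
  have hall := pvTakeDigits_all s
  simp only [pvNumSem, pvParseDur, Bool.false_or]
  by_cases hh : (pvTakeDigits s).2.headD ' ' = '/'
  · simp only [hh, if_true, pvDenSem]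
    rw [pvDur_slash hall (pvTakeDigits_all (pvTakeDigits s).2.tail)]
    simp
  · simp only [hh, if_false]
    rw [pvDur_digits hall]
    by_cases he : (pvTakeDigits s).1.isEmpty <;> simp [he]

-- the simulation: A's while loop = B's fold from an idle state
theorem pvMain : ∀ (n : Nat) (s : List Char) (t : Int), s.length ≤ n →
    pvLoopA s t = pvRun s (t, none) := by
  intro n
  induction n with
  | zero =>
    intro s t hle
    have : s = [] := List.eq_nil_of_length_eq_zero (Nat.le_zero.mp hle)
    subst this
    simp [pvLoopA, pvRun]
  | succ n ih =>
    intro s t hle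
    cases s with
    | nil => simp [pvLoopA, pvRun]
    | cons c rest =>
      simp only [List.length_cons, Nat.succ_le_succ_iff] at hle
      rw [pvLoopA, pvRun_none_cons]
      by_cases h1 : c = ' ' ∨ c = '\t'
      · rw [if_pos h1]
        have hf : pvFresh c = none := by rcases h1 with h | h <;> subst h <;> decide
        rw [hf]; exact ih rest t hle
      · rw [if_neg h1]
        by_cases h2 : c = '(' ∨ c = ')' ∨ c = '~' ∨ c = '.' ∨ c = '^' ∨ c = '_' ∨ c = '=' 
        · rw [if_pos h2]
          have hf : pvFresh c = none := by
            rcases h2 with h | h | h | h | h | h | h <;> subst h <;> decide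
          rw [hf]; exact ih rest t hle
        · rw [if_neg h2]
          by_cases h3 : c = 'z' ∨ c = 'x'
          · rw [if_pos h3]
            have hf : pvFresh c = some (1, 0, false, 0, false) := by
              simp [pvFresh, h3]
            rw [hf, pvNum_sem, pvNumSem_eq_parse]
            show pvLoopA (pvParseDur rest).2 (t + pvDurTo64 (pvParseDur rest).1)
              = pvRun (pvParseDur rest).2 (t + pvDurTo64 (pvParseDur rest).1, none)
            exact ih (pvParseDur rest).2 (t + pvDurTo64 (pvParseDur rest).1)
              (le_trans (pvParseDur_len rest) hle)
          · rw [if_neg h3]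
            by_cases h4 : (['A','B','C','D','E','F','G'].contains (PySem.Chars.upperChar c)) = true
            · rw [if_pos h4]
              have hf : pvFresh c = some (0, 0, false, 0, false) := by
                unfold pvFresh; rw [if_neg h3, if_pos h4]
              rw [hf, pvOct_sem, pvNum_sem, pvNumSem_eq_parse]
              show pvLoopA (pvParseDur (rest.dropWhile (fun d => d == '\'' || d == ','))).2
                  (t + pvDurTo64 (pvParseDur (rest.dropWhile (fun d => d == '\'' || d == ','))).1)
                = pvRun (pvParseDur (rest.dropWhile (fun d => d == '\'' || d == ','))).2
                  (t + pvDurTo64 (pvParseDur (rest.dropWhile (fun d => d == '\'' || d == ','))).1, none)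
              exact ih (pvParseDur (rest.dropWhile (fun d => d == '\'' || d == ','))).2
                (t + pvDurTo64 (pvParseDur (rest.dropWhile (fun d => d == '\'' || d == ','))).1)
                (le_trans (pvParseDur_len _) (le_trans (List.length_dropWhile_le _ _) hle))
            · rw [if_neg h4]
              have hf : pvFresh c = none := by unfold pvFresh; rw [if_neg h3, if_neg h4]
              rw [hf]; exact ih rest t hle

-- ===== VERDICT (by name: the statement is the Claim_ definition above) =====
theorem compute_bar_duration_spec : Claim_equal_compute_bar_duration := by
  unfold Claim_equal_compute_bar_duration
  intro mel_abc full_bar _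
  unfold Spec_compute_bar_duration compute_bar_duration compute_bar_duration_alt
  show (if pvLoopA (PySem.Chars.strip mel_abc.toList) 0 > 0
      then pvLoopA (PySem.Chars.strip mel_abc.toList) 0 else full_bar)
    = (if pvRun (PySem.Chars.strip mel_abc.toList) (0, none) > 0
      then pvRun (PySem.Chars.strip mel_abc.toList) (0, none) else full_bar)
  rw [pvMain (PySem.Chars.strip mel_abc.toList).length _ _ le_rfl]
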